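-- pv_equiv track=rewrite | github.com/erica-edholm/advent-of-code-2022 | src/solvers/day1.py | __get_calories_sum
-- ===== SOURCE A (Python) =====
-- def __get_calories_sum(data):
--     sums = []
--     current_sum = 0
--     for value in data:
--         if value == '':
--             sums.append(current_sum)
--             current_sum = 0
--         else:
--             current_sum += int(value)
--     sums.append(current_sum)
--     return sums
-- ===== SOURCE B (Python) =====
-- def __get_calories_sum(data):
--     # Pass 1: partition into groups at blank lines (final group flushed after the loop).
--     groups = []
--     current = []
--     for value in data:
--         if value == '':
--             groups.append(current)
--             current = []
--         else:
--             current.append(value)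
--     groups.append(current)
--     # Pass 2: sum each group.
--     return [sum(int(v) for v in group) for group in groups]
-- ===== Notes on version B (the rewrite author's own statement) =====
-- stated objective: alternative
-- what changed: B splits the work into two passes: first partition the lines into groups at blank lines, then map each group to the sum of its parsed integers, instead of A's single loop with a running sum.
import Mathlib
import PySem

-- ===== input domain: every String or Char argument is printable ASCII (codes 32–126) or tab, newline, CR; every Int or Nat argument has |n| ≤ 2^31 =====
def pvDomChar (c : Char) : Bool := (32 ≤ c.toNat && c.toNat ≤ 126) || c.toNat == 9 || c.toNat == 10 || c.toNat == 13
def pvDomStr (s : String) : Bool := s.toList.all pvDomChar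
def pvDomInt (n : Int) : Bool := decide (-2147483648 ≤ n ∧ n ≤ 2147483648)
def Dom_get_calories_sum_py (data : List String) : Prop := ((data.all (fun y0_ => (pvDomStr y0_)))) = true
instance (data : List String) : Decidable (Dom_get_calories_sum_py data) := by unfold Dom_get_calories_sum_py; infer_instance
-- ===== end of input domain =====

-- B separates A's single running-sum loop into two passes (group at blank lines, then sum each
-- group); objective: alternative decomposition, same cost. Pre_ excludes inputs where int(value)
-- raises ValueError.


-- ===== PORT A =====
-- int(value); outside Pre_ (parse failure = ValueError) the port's .getD 0 value is not claimed
def pvIntA (v : String) : Int := (PySem.Int.ofStr? v).getD 0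

-- A's single loop: state (sums, current_sum); final append after the loop
def get_calories_sum_py (data : List String) : List Int :=
  let st := data.foldl
    (fun (st : List Int × Int) value =>
      if value = "" then (st.1 ++ [st.2], 0) else (st.1, st.2 + pvIntA value))
    ([], 0)
  st.1 ++ [st.2]

-- ===== PORT B =====
-- Pass 1 of Source B: partition into groups at blank lines, flushing the last group after the loop
def pvGroupsB (data : List String) : List (List String) :=
  let st := data.foldl
    (fun (st : List (List String) × List String) value =>
      if value = "" then (st.1 ++ [st.2], []) else (st.1, st.2 ++ [value]))
    ([], [])
  st.1 ++ [st.2]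

-- Pass 2 of Source B: sum(int(v) for v in group) for each group
def pvGroupSum (g : List String) : Int := g.foldl (fun acc v => acc + pvIntA v) 0

def get_calories_sum_py_alt (data : List String) : List Int :=
  (pvGroupsB data).map pvGroupSum

-- ===== PRECONDITION & SPEC =====
-- Pre_ excludes exactly the inputs where A raises: a non-blank line that int() rejects.
def Pre_get_calories_sum_py (data : List String) : Prop :=
  ∀ v ∈ data, v ≠ "" → (PySem.Int.ofStr? v).isSome = true
instance (data : List String) : Decidable (Pre_get_calories_sum_py data) := by
  unfold Pre_get_calories_sum_py; infer_instance
def pvWitness_get_calories_sum_py : List String := ["1", "2", "", "3"]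

def Spec_get_calories_sum_py (data : List String) (out : List Int) : Prop := out = get_calories_sum_py_alt data
instance (data : List String) (out : List Int) : Decidable (Spec_get_calories_sum_py data out) := by unfold Spec_get_calories_sum_py; infer_instance

-- ===== CLAIM (what is proved, stated in full; the proofs are below) =====
def Claim_equal_get_calories_sum_py : Prop := ∀ (data : List String), Dom_get_calories_sum_py data → Pre_get_calories_sum_py data → Spec_get_calories_sum_py data (get_calories_sum_py data)

-- ===== LEMMAS AND PROOFS =====

theorem pvGroupSum_append (g : List String) (v : String) :
    pvGroupSum (g ++ [v]) = pvGroupSum g + pvIntA v := by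
  simp [pvGroupSum]

-- Invariant relating A's fold state to B's: A's sums list is the groupwise sums of B's groups,
-- and A's running sum is the sum of B's current group.
theorem pv_fold_inv (data : List String) (gs : List (List String)) (cur : List String) :
    (data.foldl
      (fun (st : List Int × Int) value =>
        if value = "" then (st.1 ++ [st.2], 0) else (st.1, st.2 + pvIntA value))
      (gs.map pvGroupSum, pvGroupSum cur))
    = (let st := data.foldl
        (fun (st : List (List String) × List String) value =>
          if value = "" then (st.1 ++ [st.2], []) else (st.1, st.2 ++ [value]))
        (gs, cur)
       (st.1.map pvGroupSum, pvGroupSum st.2)) := by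
  induction data generalizing gs cur with
  | nil => simp
  | cons v rest ih =>
    by_cases h : v = ""
    · subst h
      simpa [pvGroupSum] using ih (gs ++ [cur]) []
    · simpa [h, pvGroupSum_append] using ih gs (cur ++ [v])

-- ===== VERDICT (by name: the statement is the Claim_ definition above) =====
theorem get_calories_sum_py_spec : Claim_equal_get_calories_sum_py := by
  intro data _ _
  unfold Spec_get_calories_sum_py get_calories_sum_py get_calories_sum_py_alt pvGroupsB
  have h := pv_fold_inv data [] []
  simp only [List.map_nil, pvGroupSum, List.foldl_nil] at h
  rw [h]
  simp [pvGroupSum]
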